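-- pv_equiv track=rewrite | github.com/pushedrumex/BJAG | 프로그래머스/unrated/258712. 가장 많이 받은 선물/가장 많이 받은 선물.py | solution
-- ===== SOURCE A (Python) =====
-- def solution(friends, gifts):
--     N = len(friends)
--     record = [[0] * N for _ in range(N)]
--     name_dic = {}
--     for i in range(N):
--         name_dic[friends[i]] = i
--
--     # 선물 주고받은것 기록
--     for gift in gifts:
--         give, take = gift.split()
--         record[name_dic[give]][name_dic[take]] += 1
--
--     # 선물 지수 계산
--     level = [0] * N
--     for give in range(N):
--         count_take = 0
--         for take in range(N):
--             count_take += record[take][give]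
--         level[give] += sum(record[give]) - count_take
--
--     answer = 0
--     for give in range(N):
--         count_gift = 0
--         for take in range(N):
--             if give == take: continue
--
--             if record[give][take] > record[take][give]:
--                 count_gift += 1
--             elif record[give][take] == record[take][give] and level[give] > level[take]:
--                 count_gift += 1
--         answer = max(answer, count_gift)
--     return answer
-- ===== SOURCE B (Python) =====
-- def solution(friends, gifts):
--     n = len(friends)
--     idx = {name: i for i, name in enumerate(friends)}
--     d = {}
--     level = [0] * n
--     for gift in gifts:
--         a, b = gift.split()
--         i, j = idx[a], idx[b]
--         d[(i, j)] = d.get((i, j), 0) + 1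
--         level[i] += 1
--         level[j] -= 1
--     # rank by gift index: one sort, then first-occurrence index = number of
--     # strictly smaller levels; this is each person's win count if every pair
--     # were decided by the level rule alone
--     srt = sorted(level)
--     first = {}
--     for r, v in enumerate(srt):
--         if v not in first:
--             first[v] = r
--     wins = [first[level[i]] for i in range(n)]
--     # correct only the pairs that actually exchanged unequal amounts:
--     # there the count rule overrides the level rule
--     pairs = set()
--     for i, j in d:
--         pairs.add((i, j) if i < j else (j, i))
--     for i, j in pairs:
--         dij = d.get((i, j), 0) - d.get((j, i), 0)
--         if dij != 0:
--             wins[i if dij > 0 else j] += 1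
--             if level[i] != level[j]:
--                 wins[i if level[i] > level[j] else j] -= 1
--     return max(wins, default=0)
-- ===== Notes on version B (the rewrite author's own statement) =====
-- stated objective: faster
-- what changed: B never compares all O(n^2) pairs: it sorts the gift-index levels once so each person's rank (count of strictly smaller levels, read off a first-occurrence dict) is their win count under the level rule alone, then corrects only the pairs that actually appear in the gifts dict with unequal directional counts (+1 to the count-winner, -1 to the level-winner of that pair), replacing A's N x N matrix and per-person rescans.
import Mathlib
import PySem

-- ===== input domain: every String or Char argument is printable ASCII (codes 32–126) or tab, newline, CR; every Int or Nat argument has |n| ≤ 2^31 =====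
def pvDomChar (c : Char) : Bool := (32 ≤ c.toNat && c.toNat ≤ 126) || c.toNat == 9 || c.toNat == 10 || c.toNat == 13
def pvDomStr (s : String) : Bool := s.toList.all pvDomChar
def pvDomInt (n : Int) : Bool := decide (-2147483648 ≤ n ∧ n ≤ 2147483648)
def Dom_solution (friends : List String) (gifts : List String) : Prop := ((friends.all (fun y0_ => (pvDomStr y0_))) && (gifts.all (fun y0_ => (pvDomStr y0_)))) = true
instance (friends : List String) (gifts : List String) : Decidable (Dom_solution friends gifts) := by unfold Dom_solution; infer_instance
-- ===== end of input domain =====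

-- B drops A's O(n^2) all-pairs comparison: it sorts the gift-index levels once, reads each
-- person's level-rule win count off a first-occurrence rank dict, and then corrects only the
-- pairs actually present in the gifts dict with unequal directional counts (objective: faster).

-- ===== PORT A =====
def solution (friends : List String) (gifts : List String) : Int :=
  let N := friends.length
  let record0 : List (List Int) := (List.range N).map (fun _ => List.replicate N (0 : Int))
  let name_dic : PySem.Dict String Nat :=
    (List.range N).foldl (fun d i => d.insert (friends.getD i "") i) PySem.Dict.empty
  let record := gifts.foldl (fun rec gift =>
      let parts := PySem.Str.split₀ gift
      let gi := name_dic.getD (parts.getD 0 "") 0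
      let ti := name_dic.getD (parts.getD 1 "") 0
      rec.set gi ((rec.getD gi []).set ti ((rec.getD gi []).getD ti 0 + 1))) record0
  let level : List Int := (List.range N).map (fun give =>
      let count_take := (List.range N).foldl (fun acc take => acc + (record.getD take []).getD give 0) (0 : Int)
      0 + ((record.getD give []).sum - count_take))
  (List.range N).foldl (fun answer give =>
      let count_gift := (List.range N).foldl (fun cnt take =>
          if give = take then cnt
          else if (record.getD give []).getD take 0 > (record.getD take []).getD give 0 then cnt + 1
          else if (record.getD give []).getD take 0 = (record.getD take []).getD give 0 ∧
                  level.getD give 0 > level.getD take 0 then cnt + 1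
          else cnt) (0 : Int)
      max answer count_gift) (0 : Int)

-- ===== PORT B =====
-- helper of B: normalise an ordered pair, (i, j) if i < j else (j, i)
def pvNorm (p : Nat × Nat) : Nat × Nat := if p.1 < p.2 then p else (p.2, p.1)

def solution_alt (friends : List String) (gifts : List String) : Int :=
  let n := friends.length
  let idx : PySem.Dict String Nat :=
    friends.zipIdx.foldl (fun d p => d.insert p.1 p.2) PySem.Dict.empty
  -- one pass over gifts: d[(i,j)] += 1; level[i] += 1; level[j] -= 1
  let st := gifts.foldl (fun st gift =>
      let parts := PySem.Str.split₀ gift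
      let i := idx.getD (parts.getD 0 "") 0
      let j := idx.getD (parts.getD 1 "") 0
      (st.1.insert (i, j) (st.1.getD (i, j) 0 + 1),
       (st.2.set i (st.2.getD i 0 + 1)).set j ((st.2.set i (st.2.getD i 0 + 1)).getD j 0 - 1)))
    ((PySem.Dict.empty : PySem.Dict (Nat × Nat) Int), List.replicate n (0 : Int))
  let d := st.1
  let level := st.2
  -- one sort; first-occurrence index of a value = number of strictly smaller levels
  let srt := PySem.List.sorted level (fun x => x) false
  let first := srt.zipIdx.foldl (fun f p => if f.contains p.1 then f else f.insert p.1 p.2)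
      (PySem.Dict.empty : PySem.Dict Int Nat)
  -- level[i] is always a key of first, so getD 0 is exact (Python's first[level[i]])
  let wins0 : List Int := (List.range n).map (fun i => ((first.getD (level.getD i 0) 0 : Nat) : Int))
  let pairs := d.keys.foldl (fun s p => PySem.Set.add s (pvNorm p))
      (PySem.Set.empty : PySem.Set (Nat × Nat))
  let wins := pairs.foldl (fun w q =>
      let dij := d.getD (q.1, q.2) 0 - d.getD (q.2, q.1) 0
      if dij ≠ 0 then
        let w1 := w.set (if dij > 0 then q.1 else q.2) (w.getD (if dij > 0 then q.1 else q.2) 0 + 1)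
        if level.getD q.1 0 ≠ level.getD q.2 0 then
          w1.set (if level.getD q.1 0 > level.getD q.2 0 then q.1 else q.2)
                 (w1.getD (if level.getD q.1 0 > level.getD q.2 0 then q.1 else q.2) 0 - 1)
        else w1
      else w) wins0
  PySem.List.maxD wins (fun x => x) 0

-- ===== PRECONDITION & SPEC =====
-- Pre_ excludes exactly the inputs where A raises: a gift line whose whitespace split is
-- not exactly two tokens (ValueError on unpacking) or mentions a name not in friends (KeyError).
def Pre_solution (friends : List String) (gifts : List String) : Prop :=
  ∀ g ∈ gifts, (PySem.Str.split₀ g).length = 2 ∧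
    (PySem.Str.split₀ g).getD 0 "" ∈ friends ∧ (PySem.Str.split₀ g).getD 1 "" ∈ friends
instance (friends : List String) (gifts : List String) : Decidable (Pre_solution friends gifts) := by
  unfold Pre_solution; infer_instance
def pvWitness_solution : List String × List String :=
  (["muzi", "frodo", "apeach"], ["muzi frodo", "frodo muzi", "muzi frodo", "apeach muzi"])
def Spec_solution (friends : List String) (gifts : List String) (out : Int) : Prop :=
  out = solution_alt friends gifts
instance (friends : List String) (gifts : List String) (out : Int) : Decidable (Spec_solution friends gifts out) := by
  unfold Spec_solution; infer_instance

-- ===== CLAIM =====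
def Claim_equal_solution : Prop := ∀ (friends : List String) (gifts : List String),
  Dom_solution friends gifts → Pre_solution friends gifts →
  Spec_solution friends gifts (solution friends gifts)

-- ===== LEMMAS AND PROOFS =====

-- ---- proof-side abstractions ----
def pvParse (d : PySem.Dict String Nat) (g : String) : Nat × Nat :=
  let parts := PySem.Str.split₀ g
  (d.getD (parts.getD 0 "") 0, d.getD (parts.getD 1 "") 0)

def pvD (friends : List String) : PySem.Dict String Nat :=
  (List.range friends.length).foldl (fun d i => d.insert (friends.getD i "") i) PySem.Dict.empty

def pvP (friends gifts : List String) : List (Nat × Nat) := gifts.map (pvParse (pvD friends))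

def pvC (P : List (Nat × Nat)) (i j : Nat) : Int := (P.count (i, j) : Int)

def pvLv (P : List (Nat × Nat)) (i : Nat) : Int :=
  (P.countP (fun p => p.1 == i) : Int) - (P.countP (fun p => p.2 == i) : Int)

def pvWinb (P : List (Nat × Nat)) (i j : Nat) : Bool :=
  decide (pvC P i j > pvC P j i ∨ (pvC P i j = pvC P j i ∧ pvLv P i > pvLv P j))

def pvStep (rec : List (List Int)) (p : Nat × Nat) : List (List Int) :=
  rec.set p.1 ((rec.getD p.1 []).set p.2 ((rec.getD p.1 []).getD p.2 0 + 1))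

def pvPairs (N : Nat) : List (Nat × Nat) :=
  (List.range N).flatMap (fun i => (List.range' (i + 1) (N - (i + 1))).map (fun j => (i, j)))

-- contribution of one corrected pair to person k's win count
def pvContrib (P : List (Nat × Nat)) (k : Nat) (q : Nat × Nat) : Int :=
  if pvC P q.1 q.2 - pvC P q.2 q.1 ≠ 0 then
    (if (if pvC P q.1 q.2 - pvC P q.2 q.1 > 0 then q.1 else q.2) = k then 1 else 0)
    + (if pvLv P q.1 ≠ pvLv P q.2 then
        (if (if pvLv P q.1 > pvLv P q.2 then q.1 else q.2) = k then -1 else 0) else 0)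
  else 0

-- per-opponent form of that contribution
def pvG (P : List (Nat × Nat)) (k j : Nat) : Int :=
  (if pvC P k j > pvC P j k then 1 else 0)
  + (if pvC P k j ≠ pvC P j k ∧ pvLv P k > pvLv P j then -1 else 0)

-- A's per-person count, as in its inner loop
def pvA (P : List (Nat × Nat)) (n k : Nat) : Int :=
  ((List.countP (fun t => decide (k ≠ t) && pvWinb P k t) (List.range n) : Nat) : Int)

-- ---- the two name→index dictionaries coincide ----
lemma pv_zipIdx_eq (l : List String) :
    l.zipIdx = (List.range l.length).map (fun i => (l.getD i "", i)) := by
  apply List.ext_getElem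
  · simp
  · intro i h1 h2
    simp only [List.getElem_zipIdx, List.getElem_map, List.getElem_range, Nat.zero_add]
    rw [List.getD_eq_getElem?_getD, List.getElem?_eq_getElem (by simpa using h1)]
    simp

lemma pv_dict_build_eq (l : List String) :
    (List.range l.length).foldl (fun d i => d.insert (l.getD i "") i)
        (PySem.Dict.empty : PySem.Dict String Nat)
      = l.zipIdx.foldl (fun d p => d.insert p.1 p.2) PySem.Dict.empty := by
  rw [pv_zipIdx_eq, List.foldl_map]

lemma pv_fold_insert_val (Pv : Nat → Prop)
    (l : List Nat) (key : Nat → String) (d : PySem.Dict String Nat)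
    (hd : ∀ s v, d.get? s = some v → Pv v) (hl : ∀ i ∈ l, Pv i) :
    ∀ s v, (l.foldl (fun d i => d.insert (key i) i) d).get? s = some v → Pv v := by
  induction l generalizing d with
  | nil => exact hd
  | cons a t ih =>
    intro s v hv
    refine ih _ ?_ (fun i hi => hl i (by simp [hi])) s v hv
    intro s' v' h'
    by_cases hk : s' = key a
    · subst hk; rw [PySem.Dict.get?_insert_self] at h'
      exact (Option.some_inj.mp h') ▸ hl a (by simp)
    · rw [PySem.Dict.get?_insert_of_ne _ _ hk] at h'
      exact hd _ _ h'

lemma pv_fold_insert_contains (l : List String) (s : String) (h : s ∈ l) :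
    ((List.range l.length).foldl (fun d i => d.insert (l.getD i "") i)
        (PySem.Dict.empty : PySem.Dict String Nat)).contains s = true := by
  rw [PySem.Dict.contains_iff_mem_keys, PySem.Dict.keys_foldl_insert_key, PySem.Dict.keys_empty]
  show s ∈ PySem.Set.update ([] : PySem.Set String) _
  rw [show PySem.Set.update ([] : PySem.Set String) ((List.range l.length).map (fun i => l.getD i ""))
        = PySem.Set.ofList ((List.range l.length).map (fun i => l.getD i "")) from rfl,
      PySem.Set.mem_ofList]
  obtain ⟨i, hi, he⟩ := List.mem_iff_getElem.mp h
  exact List.mem_map.mpr ⟨i, List.mem_range.mpr hi,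
    by rw [List.getD_eq_getElem?_getD, List.getElem?_eq_getElem hi, he]; rfl⟩

lemma pv_idx_lt (l : List String) (s : String) (h : s ∈ l) :
    ((List.range l.length).foldl (fun d i => d.insert (l.getD i "") i)
        (PySem.Dict.empty : PySem.Dict String Nat)).getD s 0 < l.length := by
  set D := (List.range l.length).foldl (fun d i => d.insert (l.getD i "") i)
      (PySem.Dict.empty : PySem.Dict String Nat) with hD
  have hc : D.contains s = true := pv_fold_insert_contains l s h
  rw [PySem.Dict.contains_eq_isSome_get?] at hc
  obtain ⟨v, hv⟩ := Option.isSome_iff_exists.mp hc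
  have hvlt : v < l.length := by
    refine pv_fold_insert_val (fun v => v < l.length) _ _ _ ?_ ?_ s v (hD ▸ hv)
    · intro s' v' h'; simp [PySem.Dict.get?_empty] at h'
    · intro i hi; exact List.mem_range.mp hi
  rw [PySem.Dict.getD_eq_get?_getD, hv]; exact hvlt

-- ---- A's record matrix ----
lemma pv_getD_eq_getElem {α : Type} (d : α) (M : List α) (i : Nat) (h : i < M.length) :
    M.getD i d = M[i] := by
  rw [List.getD_eq_getElem?_getD, List.getElem?_eq_getElem h]; rfl

lemma pv_getD_set {α : Type} (l : List α) (a : Nat) (x : α) (d : α) (i : Nat)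
    (ha : a < l.length) :
    (l.set a x).getD i d = if a = i then x else l.getD i d := by
  by_cases hi : i < l.length
  · rw [pv_getD_eq_getElem _ _ _ (by simpa using hi), List.getElem_set]
    split_ifs with h
    · rfl
    · exact (pv_getD_eq_getElem _ _ _ hi).symm
  · rw [if_neg (by omega)]
    rw [List.getD_eq_getElem?_getD, List.getD_eq_getElem?_getD,
        List.getElem?_eq_none (by simpa using hi), List.getElem?_eq_none (by omega)]

lemma pvStep_shape (M : List (List Int)) (N : Nat) (p : Nat × Nat) (hp : p.1 < N)
    (hlen : M.length = N) (hrow : ∀ r ∈ M, r.length = N) :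
    (pvStep M p).length = N ∧ ∀ r ∈ pvStep M p, r.length = N := by
  refine ⟨by simp [pvStep, hlen], ?_⟩
  intro r hr
  rcases List.mem_or_eq_of_mem_set hr with h | h
  · exact hrow r h
  · subst h
    have hMp : p.1 < M.length := by omega
    rw [List.length_set, pv_getD_eq_getElem _ _ _ hMp]
    exact hrow _ (List.getElem_mem hMp)

lemma pvStep_entry (M : List (List Int)) (N : Nat) (p : Nat × Nat)
    (hp1 : p.1 < N) (hp2 : p.2 < N)
    (hlen : M.length = N) (hrow : ∀ r ∈ M, r.length = N) (i j : Nat) :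
    ((pvStep M p).getD i []).getD j 0
      = (M.getD i []).getD j 0 + (if p = (i, j) then 1 else 0) := by
  have hMp : p.1 < M.length := by omega
  have hplen : (M.getD p.1 []).length = N := by
    rw [pv_getD_eq_getElem _ _ _ hMp]; exact hrow _ (List.getElem_mem hMp)
  unfold pvStep
  rw [pv_getD_set _ _ _ _ _ hMp]
  by_cases h1 : p.1 = i
  · rw [if_pos h1, pv_getD_set _ _ _ _ _ (by omega)]
    by_cases h2 : p.2 = j
    · rw [if_pos h2, if_pos (by simp [Prod.ext_iff, h1, h2]), h1, h2]
    · rw [if_neg h2, if_neg (by simp [Prod.ext_iff]; omega), h1, add_zero]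
  · rw [if_neg h1, if_neg (by simp [Prod.ext_iff]; omega), add_zero]

lemma pv_record_entry (P : List (Nat × Nat)) (N : Nat) (M : List (List Int))
    (hlen : M.length = N) (hrow : ∀ r ∈ M, r.length = N)
    (hP : ∀ p ∈ P, p.1 < N ∧ p.2 < N) (i j : Nat) :
    ((P.foldl pvStep M).getD i []).getD j 0
      = (M.getD i []).getD j 0 + (P.count (i, j) : Int) := by
  induction P generalizing M with
  | nil => simp
  | cons a t ih =>
    have ha := hP a (by simp)
    obtain ⟨hl, hr⟩ := pvStep_shape M N a ha.1 hlen hrow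
    rw [List.foldl_cons, ih _ hl hr (fun p hp => hP p (by simp [hp])),
        pvStep_entry M N a ha.1 ha.2 hlen hrow i j, List.count_cons]
    push_cast
    by_cases h : a = (i, j) <;> simp [h] <;> ring

lemma pv_record_shape (P : List (Nat × Nat)) (N : Nat) (M : List (List Int))
    (hlen : M.length = N) (hrow : ∀ r ∈ M, r.length = N)
    (hP : ∀ p ∈ P, p.1 < N ∧ p.2 < N) :
    (P.foldl pvStep M).length = N ∧ ∀ r ∈ P.foldl pvStep M, r.length = N := by
  induction P generalizing M with
  | nil => exact ⟨hlen, hrow⟩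
  | cons a t ih =>
    obtain ⟨hl, hr⟩ := pvStep_shape M N a (hP a (by simp)).1 hlen hrow
    exact ih _ hl hr (fun p hp => hP p (by simp [hp]))

-- ---- sums over rows and columns are directional gift counts ----
lemma pv_sum_eq_range (l : List Int) :
    l.sum = ((List.range l.length).map (fun j => l.getD j 0)).sum := by
  induction l with
  | nil => simp
  | cons a t ih => simp [List.range_succ_eq_map, List.map_map, Function.comp_def, ih]

lemma pv_count_ind (a : Nat × Nat) (i N : Nat) (ha2 : a.2 < N) :
    (List.countP (fun j => decide (a = (i, j))) (List.range N) : Int)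
      = if a.1 = i then 1 else 0 := by
  by_cases h1 : a.1 = i
  · rw [if_pos h1]
    have hf : (fun j => decide (a = (i, j))) = (fun j => j == a.2) := by
      funext j
      by_cases hj : j = a.2
      · subst hj; simp [Prod.ext_iff, h1]
      · have hd : decide (a = (i, j)) = false := decide_eq_false (by simp [Prod.ext_iff]; omega)
        have hb : (j == a.2) = false := by simp [hj]
        rw [hd, hb]
    rw [hf, show List.countP (fun j => j == a.2) (List.range N) = List.count a.2 (List.range N) from rfl,
        List.count_range, if_pos ha2]
    rfl
  · rw [if_neg h1, List.countP_eq_zero.mpr (fun j _ => by simp [Prod.ext_iff]; omega)]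
    rfl

lemma pv_sum_count_fst (P : List (Nat × Nat)) (N i : Nat) (h : ∀ p ∈ P, p.2 < N) :
    ((List.range N).map (fun j => (P.count (i, j) : Int))).sum
      = (P.countP (fun p => p.1 == i) : Int) := by
  induction P with
  | nil => simp
  | cons a t ih =>
    have ha2 : a.2 < N := (h a (by simp))
    have ih' := ih (fun p hp => h p (by simp [hp]))
    simp only [List.count_cons, List.countP_cons]
    have hstep : ∀ j ∈ List.range N, ((List.count (i, j) t + if (a == (i, j)) = true then 1 else 0 : Nat) : Int)
        = (List.count (i, j) t : Int) + (if (decide (a = (i, j))) = true then (1:Int) else 0) := by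
      intro j _; by_cases had : a = (i, j) <;> simp [had]
    rw [List.map_congr_left hstep, PySem.List.sum_map_add_int, ih',
        PySem.List.sum_map_ite_one_zero (fun j => decide (a = (i, j))), pv_count_ind a i N ha2]
    by_cases h1 : a.1 = i <;> push_cast <;> simp [h1, Prod.ext_iff] <;> omega

lemma pv_sum_count_snd (P : List (Nat × Nat)) (N i : Nat) (h : ∀ p ∈ P, p.1 < N) :
    ((List.range N).map (fun t => (P.count (t, i) : Int))).sum
      = (P.countP (fun p => p.2 == i) : Int) := by
  induction P with
  | nil => simp
  | cons a t ih =>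
    have ha1 : a.1 < N := (h a (by simp))
    have ih' := ih (fun p hp => h p (by simp [hp]))
    simp only [List.count_cons, List.countP_cons]
    have hstep : ∀ g ∈ List.range N, ((List.count (g, i) t + if (a == (g, i)) = true then 1 else 0 : Nat) : Int)
        = (List.count (g, i) t : Int) + (if (decide (a = (g, i))) = true then (1:Int) else 0) := by
      intro g _; by_cases had : a = (g, i) <;> simp [had]
    have hind : (List.countP (fun g => decide (a = (g, i))) (List.range N) : Int)
        = if a.2 = i then 1 else 0 := by
      by_cases h2 : a.2 = i
      · rw [if_pos h2]
        have hf : (fun g => decide (a = (g, i))) = (fun g => g == a.1) := by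
          funext g
          by_cases hg : g = a.1
          · subst hg; simp [Prod.ext_iff, h2]
          · have hd : decide (a = (g, i)) = false := decide_eq_false (by simp [Prod.ext_iff]; omega)
            have hb : (g == a.1) = false := by simp [hg]
            rw [hd, hb]
        rw [hf, show List.countP (fun g => g == a.1) (List.range N) = List.count a.1 (List.range N) from rfl,
            List.count_range, if_pos ha1]
        rfl
      · rw [if_neg h2, List.countP_eq_zero.mpr (fun g _ => by simp [Prod.ext_iff]; omega)]
        rfl
    rw [List.map_congr_left hstep, PySem.List.sum_map_add_int, ih',
        PySem.List.sum_map_ite_one_zero (fun g => decide (a = (g, i))), hind]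
    by_cases h2 : a.2 = i <;> push_cast <;> simp [h2, Prod.ext_iff] <;> omega

-- ---- A normalised: a running max of per-person win counts ----
lemma pv_A_norm (friends gifts : List String)
    (hP : ∀ p ∈ pvP friends gifts, p.1 < friends.length ∧ p.2 < friends.length) :
    solution friends gifts
      = (List.range friends.length).foldl (fun a k =>
          max a (pvA (pvP friends gifts) friends.length k)) 0 := by
  have hrec :
      List.foldl (fun rec gift =>
        rec.set ((pvD friends).getD ((PySem.Str.split₀ gift).getD 0 "") 0)
          ((rec.getD ((pvD friends).getD ((PySem.Str.split₀ gift).getD 0 "") 0) []).set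
            ((pvD friends).getD ((PySem.Str.split₀ gift).getD 1 "") 0)
            ((rec.getD ((pvD friends).getD ((PySem.Str.split₀ gift).getD 0 "") 0) []).getD
                ((pvD friends).getD ((PySem.Str.split₀ gift).getD 1 "") 0) 0 + 1)))
        ((List.range friends.length).map (fun _ => List.replicate friends.length (0:Int))) gifts
      = (pvP friends gifts).foldl pvStep
          ((List.range friends.length).map (fun _ => List.replicate friends.length (0:Int))) := by
    rw [pvP, List.foldl_map]
    rfl
  simp only [solution]
  rw [show (List.range friends.length).foldl (fun d i => d.insert (friends.getD i "") i)
        PySem.Dict.empty = pvD friends from rfl]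
  rw [hrec]
  set P := pvP friends gifts with hPdef
  set n := friends.length with hn
  set M0 := (List.range n).map (fun _ => List.replicate n (0:Int)) with hM0
  set R := P.foldl pvStep M0 with hR
  have hM0len : M0.length = n := by simp [hM0]
  have hM0row : ∀ r ∈ M0, r.length = n := by
    intro r hr
    obtain ⟨_, _, rfl⟩ := List.mem_map.mp hr
    simp
  have hshape := pv_record_shape P n M0 hM0len hM0row hP
  have hM0e : ∀ i j, ((M0.getD i []).getD j 0) = 0 := by
    intro i j
    rcases Nat.lt_or_ge i n with hi | hi
    · rw [hM0, PySem.List.getD_map_range _ _ _ _ hi]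
      rcases Nat.lt_or_ge j n with hj | hj
      · rw [List.getD_eq_getElem?_getD, List.getElem?_eq_getElem (by simpa using hj)]
        simp
      · rw [List.getD_eq_getElem?_getD, List.getElem?_eq_none (by simpa using hj)]
        rfl
    · rw [List.getD_eq_getElem?_getD (l := M0), List.getElem?_eq_none (by simpa [hM0] using hi)]
      rfl
  have hE : ∀ i j, ((R.getD i []).getD j 0) = pvC P i j := by
    intro i j
    rw [hR, pv_record_entry P n M0 hM0len hM0row hP i j, hM0e i j, zero_add, pvC]
  have hRlen : R.length = n := hshape.1
  have hrowlen : ∀ i, i < n → (R.getD i []).length = n := by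
    intro i hi
    rw [pv_getD_eq_getElem _ _ _ (by omega : i < R.length)]
    · exact hshape.2 _ (List.getElem_mem (by omega))
  have hlvl :
      (List.range n).map (fun give =>
        0 + ((R.getD give []).sum
          - List.foldl (fun acc take => acc + (R.getD take []).getD give 0) 0 (List.range n)))
      = (List.range n).map (fun i => pvLv P i) := by
    apply List.map_congr_left
    intro give hg
    have hgn : give < n := List.mem_range.mp hg
    rw [pv_sum_eq_range (R.getD give []), hrowlen give hgn]
    rw [List.map_congr_left (fun j (_ : j ∈ List.range n) => hE give j)]
    rw [PySem.List.foldl_add (List.range n) (fun take => (R.getD take []).getD give 0) 0]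
    rw [List.map_congr_left (fun t (_ : t ∈ List.range n) => hE t give)]
    rw [show List.map (pvC P give) (List.range n)
          = List.map (fun j => (P.count (give, j) : Int)) (List.range n) from rfl]
    rw [show List.map (fun t => pvC P t give) (List.range n)
          = List.map (fun t => (P.count (t, give) : Int)) (List.range n) from rfl]
    rw [pv_sum_count_fst P n give (fun p hp => (hP p hp).2),
        pv_sum_count_snd P n give (fun p hp => (hP p hp).1)]
    rw [pvLv]
    ring
  rw [hlvl]
  refine PySem.List.foldl_congr_mem _ _ _ _ ?_
  intro acc give hgive
  have hgn : give < n := List.mem_range.mp hgive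
  congr 1
  have hinner : ∀ (cnt : Int) (take : Nat), take ∈ List.range n →
      (if give = take then cnt
       else if (R.getD give []).getD take 0 > (R.getD take []).getD give 0 then cnt + 1
       else if (R.getD give []).getD take 0 = (R.getD take []).getD give 0 ∧
               ((List.range n).map (fun i => pvLv P i)).getD give 0 > ((List.range n).map (fun i => pvLv P i)).getD take 0 then cnt + 1
       else cnt)
      = (if (decide (give ≠ take) && pvWinb P give take) then cnt + 1 else cnt) := by
    intro cnt take htake
    have htn : take < n := List.mem_range.mp htake
    rw [hE give take, hE take give,
        PySem.List.getD_map_range _ _ _ _ hgn, PySem.List.getD_map_range _ _ _ _ htn]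
    by_cases hgt : give = take
    · subst hgt
      rw [if_pos rfl, if_neg (by simp)]
    · rw [if_neg hgt]
      by_cases h1 : pvC P give take > pvC P take give
      · rw [if_pos h1, if_pos (by simp [pvWinb, hgt]; omega)]
      · rw [if_neg h1]
        by_cases h2 : pvC P give take = pvC P take give ∧ pvLv P give > pvLv P take
        · rw [if_pos h2, if_pos (by simp [pvWinb, hgt]; omega)]
        · rw [if_neg h2, if_neg (by simp [pvWinb, hgt]; omega)]
  rw [PySem.List.foldl_congr_mem _ _ _ (0:Int) hinner, PySem.List.foldl_if_add_one, zero_add]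
  rfl

-- ---- B-side lemmas ----
lemma pv_split2 {β : Type} (l : List β) (k1 : β → Nat × Nat) (f2 : List Int → β → List Int)
    (s : PySem.Dict (Nat × Nat) Int × List Int) :
    l.foldl (fun st x =>
        (st.1.insert (k1 x) (st.1.getD (k1 x) 0 + 1), f2 st.2 x)) s
      = (l.foldl (fun d x => d.insert (k1 x) (d.getD (k1 x) 0 + 1)) s.1,
         l.foldl f2 s.2) := by
  induction l generalizing s with
  | nil => rfl
  | cons a t ih => simp only [List.foldl_cons]; rw [ih]

-- one gift's effect on the level list
lemma pv_lvstep_entry (l : List Int) (p : Nat × Nat) (hp1 : p.1 < l.length) (hp2 : p.2 < l.length) (k : Nat) :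
    ((l.set p.1 (l.getD p.1 0 + 1)).set p.2 ((l.set p.1 (l.getD p.1 0 + 1)).getD p.2 0 - 1)).getD k 0
      = l.getD k 0 + (if p.1 = k then 1 else 0) - (if p.2 = k then 1 else 0) := by
  rw [pv_getD_set _ _ _ _ _ (by simpa using hp2), pv_getD_set _ _ _ _ _ hp1,
      pv_getD_set _ _ _ _ _ hp1]
  by_cases h2 : p.2 = k <;> by_cases h1 : p.1 = k <;>
    simp [h1, h2] <;> omega

lemma pv_level_fold (P : List (Nat × Nat)) (l : List Int)
    (hP : ∀ p ∈ P, p.1 < l.length ∧ p.2 < l.length) :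
    (P.foldl (fun l p =>
        (l.set p.1 (l.getD p.1 0 + 1)).set p.2 ((l.set p.1 (l.getD p.1 0 + 1)).getD p.2 0 - 1)) l).length
      = l.length ∧
    ∀ k, (P.foldl (fun l p =>
        (l.set p.1 (l.getD p.1 0 + 1)).set p.2 ((l.set p.1 (l.getD p.1 0 + 1)).getD p.2 0 - 1)) l).getD k 0
      = l.getD k 0 + (P.countP (fun p => p.1 == k) : Int) - (P.countP (fun p => p.2 == k) : Int) := by
  induction P generalizing l with
  | nil => simp
  | cons a t ih =>
    have ha := hP a (by simp)
    have hlen : ((l.set a.1 (l.getD a.1 0 + 1)).set a.2 ((l.set a.1 (l.getD a.1 0 + 1)).getD a.2 0 - 1)).length = l.length := by simp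
    obtain ⟨ihl, ihe⟩ := ih _ (fun p hp => by rw [hlen]; exact hP p (by simp [hp]))
    refine ⟨by rw [List.foldl_cons, ihl, hlen], ?_⟩
    intro k
    rw [List.foldl_cons, ihe k, pv_lvstep_entry l a ha.1 ha.2 k]
    simp only [List.countP_cons]
    by_cases h1 : a.1 = k <;> by_cases h2 : a.2 = k <;> simp [h1, h2] <;> push_cast <;> omega

-- first-occurrence dict: once a key is present it never changes
lemma pv_first_stable (l : List Int) (s : Nat) (d : PySem.Dict Int Nat) (v : Int)
    (h : d.contains v = true) :
    ((l.zipIdx s).foldl (fun f p => if f.contains p.1 then f else f.insert p.1 p.2) d).get? v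
      = d.get? v := by
  induction l generalizing s d with
  | nil => rfl
  | cons a t ih =>
    rw [List.zipIdx_cons, List.foldl_cons]
    by_cases ha : d.contains a = true
    · rw [if_pos ha]; exact ih _ _ h
    · rw [if_neg ha]
      have hva : v ≠ a := by rintro rfl; rw [h] at ha; exact ha rfl
      rw [ih _ _ (by rw [PySem.Dict.contains_insert]; simp [h]),
          PySem.Dict.get?_insert_of_ne _ _ hva]

-- first-occurrence dict: a fresh key gets its first index
lemma pv_first_build (l : List Int) (s : Nat) (d : PySem.Dict Int Nat) (v : Int)
    (hv : v ∈ l) (hd : d.contains v = false) :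
    ((l.zipIdx s).foldl (fun f p => if f.contains p.1 then f else f.insert p.1 p.2) d).get? v
      = some (s + l.idxOf v) := by
  induction l generalizing s d with
  | nil => simp at hv
  | cons a t ih =>
    rw [List.zipIdx_cons, List.foldl_cons]
    by_cases hav : a = v
    · subst hav
      rw [if_neg (by simp [hd]), pv_first_stable _ _ _ _ (by rw [PySem.Dict.contains_insert]; simp),
          PySem.Dict.get?_insert_self]
      simp [List.idxOf_cons]
    · have hvt : v ∈ t := (List.mem_cons.mp hv).resolve_left (fun h => hav h.symm)
      have hidx : List.idxOf v (a :: t) = List.idxOf v t + 1 := by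
        have hb : (a == v) = false := by simp [hav]
        rw [List.idxOf_cons, hb]
        rfl
      by_cases ha : d.contains a = true
      · rw [if_pos ha, ih _ _ hvt hd, hidx]; congr 1; omega
      · rw [if_neg ha, ih _ _ hvt (by rw [PySem.Dict.contains_insert]; simp [hd]; exact fun h => hav h.symm),
            hidx]
        congr 1; omega

-- in a sorted list the first index of a value counts the strictly smaller elements
lemma pv_idxOf_sorted (l : List Int) (v : Int) (hs : l.Pairwise (· ≤ ·)) (hv : v ∈ l) :
    l.idxOf v = l.countP (fun x => decide (x < v)) := by
  induction l with
  | nil => simp at hv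
  | cons a t ih =>
    have hle : ∀ x ∈ t, a ≤ x := fun x hx => (List.pairwise_cons.mp hs).1 x hx
    by_cases hav : a = v
    · subst hav
      have h0 : t.countP (fun x => decide (x < a)) = 0 :=
        List.countP_eq_zero.mpr (fun x hx => by simp; exact hle x hx)
      simp [List.idxOf_cons, List.countP_cons, h0]
    · have hvt : v ∈ t := (List.mem_cons.mp hv).resolve_left (fun h => hav h.symm)
      have hav' : a < v := lt_of_le_of_ne (hle v hvt) hav
      have hb : (a == v) = false := by simp [hav]
      rw [List.idxOf_cons, hb, List.countP_cons, ih (List.pairwise_cons.mp hs).2 hvt]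
      simp [hav']

-- additive single-term sum over a nodup list
lemma pv_sum_ite_single (l : List Nat) (k : Nat) (c : Int) (hl : l.Nodup) :
    ((l.map (fun x => if x = k then c else 0)).sum) = if k ∈ l then c else 0 := by
  induction l with
  | nil => simp
  | cons a t ih =>
    simp only [List.map_cons, List.sum_cons, List.mem_cons]
    rw [ih (List.nodup_cons.mp hl).2]
    by_cases hak : a = k
    · subst hak
      rw [if_pos rfl, if_neg (List.nodup_cons.mp hl).1, if_pos (Or.inl rfl)]
      ring
    · have hne : a ≠ k := hak
      by_cases hkt : k ∈ t
      · simp [hne, hkt]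
      · simp [hne, hkt, Ne.symm hne]

-- sums of a function over two nodup lists agree when it vanishes off their intersection
lemma pv_sum_nodup_ext {α : Type} [DecidableEq α] (l1 l2 : List α) (f : α → Int)
    (h1 : l1.Nodup) (h2 : l2.Nodup)
    (v1 : ∀ x ∈ l1, x ∉ l2 → f x = 0) (v2 : ∀ x ∈ l2, x ∉ l1 → f x = 0) :
    (l1.map f).sum = (l2.map f).sum := by
  have key : ∀ (l : List α), (l.map f).sum = ((l.filter (fun x => decide (f x ≠ 0))).map f).sum := by
    intro l
    induction l with
    | nil => rfl
    | cons a t ih =>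
      by_cases hfa : f a = 0
      · simp [List.filter_cons, hfa, ih]
      · simp [List.filter_cons, hfa, ih]
  rw [key l1, key l2]
  have hperm : (l1.filter (fun x => decide (f x ≠ 0))).Perm (l2.filter (fun x => decide (f x ≠ 0))) := by
    refine (List.perm_ext_iff_of_nodup (h1.filter _) (h2.filter _)).mpr ?_
    intro x
    simp only [List.mem_filter, decide_eq_true_eq]
    constructor
    · rintro ⟨hx, hfx⟩
      refine ⟨?_, hfx⟩
      by_contra hx2
      exact hfx (v1 x hx hx2)
    · rintro ⟨hx, hfx⟩
      refine ⟨?_, hfx⟩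
      by_contra hx1
      exact hfx (v2 x hx hx1)
  exact (hperm.map f).sum_eq

lemma pv_mem_pairs (n : Nat) (p : Nat × Nat) : p ∈ pvPairs n ↔ p.1 < p.2 ∧ p.2 < n := by
  simp only [pvPairs, List.mem_flatMap, List.mem_map, List.mem_range, List.mem_range'_1]
  constructor
  · rintro ⟨i, hi, j, hj, heq⟩
    subst heq; simp at hj ⊢; omega
  · rintro ⟨h1, h2⟩
    exact ⟨p.1, by omega, p.2, by omega, rfl⟩

lemma pv_nodup_pvPairs (n : Nat) : (pvPairs n).Nodup := by
  unfold pvPairs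
  apply List.nodup_flatMap.mpr
  refine ⟨fun i _ => List.Nodup.map (fun a b h => by injection h) (List.nodup_range' 1 (by norm_num)), ?_⟩
  refine List.Pairwise.imp ?_ (List.pairwise_lt_range)
  intro i j hij
  simp only [Function.onFun, List.disjoint_left]
  rintro p hp hq
  obtain ⟨a, _, rfl⟩ := List.mem_map.mp hp
  obtain ⟨b, _, hb⟩ := List.mem_map.mp hq
  injection hb.symm with h1 h2
  omega

-- contribution of a pair (i,j), i ≠ j, seen from person k
lemma pv_contrib_eval (P : List (Nat × Nat)) (k i j : Nat) (hij : i ≠ j) :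
    pvContrib P k (i, j) = if k = i then pvG P k j else if k = j then pvG P k i else 0 := by
  unfold pvContrib pvG
  simp only
  rcases eq_or_ne k i with rfl | hki <;> rcases eq_or_ne k j with rfl | hkj <;>
    split_ifs <;> omega

lemma pv_G_self (P : List (Nat × Nat)) (k : Nat) : pvG P k k = 0 := by
  unfold pvG
  rw [if_neg (by omega), if_neg (by rintro ⟨h, _⟩; omega)]
  ring

-- sum over inner lists of a flatMap
lemma pv_sum_flatMap (L : List Nat) (f : Nat → List Int) :
    (L.flatMap f).sum = (L.map (fun a => (f a).sum)).sum := by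
  induction L with
  | nil => rfl
  | cons a t ih => simp [ih]

-- sum of contributions over all ordered index pairs i < j < n
lemma pv_sum_pvPairs_contrib (P : List (Nat × Nat)) (n k : Nat) (hk : k < n) :
    (((pvPairs n).map (pvContrib P k)).sum)
      = ((List.range n).map (fun j => pvG P k j)).sum := by
  unfold pvPairs
  rw [List.map_flatMap, pv_sum_flatMap]
  have hinner : ∀ i ∈ List.range n,
      ((((List.range' (i + 1) (n - (i + 1))).map (fun j => (i, j))).map (pvContrib P k)).sum)
        = if i = k then ((List.range' (k + 1) (n - (k + 1))).map (fun j => pvG P k j)).sum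
          else if i < k then pvG P k i else 0 := by
    intro i hi
    rw [List.map_map]
    by_cases hik : i = k
    · subst hik
      rw [if_pos rfl]
      congr 1
      apply List.map_congr_left
      intro j hj
      have hj' := List.mem_range'_1.mp hj
      simp only [Function.comp_apply]
      rw [pv_contrib_eval P i i j (by omega), if_pos rfl]
    · rw [if_neg hik]
      have he : ∀ j ∈ List.range' (i + 1) (n - (i + 1)),
          (Function.comp (pvContrib P k) (fun j => (i, j))) j = if j = k then pvG P k i else 0 := by
        intro j hj
        have hj' := List.mem_range'_1.mp hj
        simp only [Function.comp_apply]
        rw [pv_contrib_eval P k i j (by omega), if_neg (fun h => hik h.symm)]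
        by_cases hjk : j = k
        · rw [if_pos (hjk ▸ rfl), if_pos hjk]
        · rw [if_neg (fun h => hjk h.symm), if_neg hjk]
      rw [List.map_congr_left he, pv_sum_ite_single _ _ _ (List.nodup_range' 1 (by norm_num))]
      by_cases hlt : i < k
      · rw [if_pos (List.mem_range'_1.mpr (by omega)), if_pos hlt]
      · rw [if_neg (fun hm => hlt (by have := List.mem_range'_1.mp hm; omega)), if_neg hlt]
  rw [List.map_congr_left hinner]
  have hsplit : List.range n = List.range' 0 k ++ [k] ++ List.range' (k + 1) (n - (k + 1)) := by
    rw [List.range_eq_range']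
    have h1 : List.range' 0 n = List.range' 0 k ++ List.range' k (n - k) := by
      have h2 := List.range'_append (s := 0) (m := k) (n := n - k) (step := 1)
      simp only [Nat.one_mul, Nat.zero_add] at h2
      rw [show k + (n - k) = n by omega] at h2
      exact h2.symm
    rw [h1, show n - k = (n - (k+1)) + 1 by omega, List.range'_succ]
    simp
  rw [hsplit]
  simp only [List.map_append, List.sum_append, List.map_cons, List.map_nil, List.sum_cons,
    List.sum_nil]
  have e1 : (List.range' 0 k).map (fun i =>
        if i = k then ((List.range' (k + 1) (n - (k + 1))).map (fun j => pvG P k j)).sum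
        else if i < k then pvG P k i else 0)
      = (List.range' 0 k).map (fun i => pvG P k i) := by
    apply List.map_congr_left
    intro i hi
    have hi' := List.mem_range'_1.mp hi
    rw [if_neg (by omega), if_pos (by omega)]
  have e3 : (List.range' (k + 1) (n - (k + 1))).map (fun i =>
        if i = k then ((List.range' (k + 1) (n - (k + 1))).map (fun j => pvG P k j)).sum
        else if i < k then pvG P k i else 0)
      = (List.range' (k + 1) (n - (k + 1))).map (fun _ => (0 : Int)) := by
    apply List.map_congr_left
    intro i hi
    have hi' := List.mem_range'_1.mp hi
    rw [if_neg (by omega), if_neg (by omega)]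
  rw [e1, e3, pv_G_self]
  simp

-- the level-rule win count read off the rank
def pvS (P : List (Nat × Nat)) (n k : Nat) : Int :=
  ((List.countP (fun j => decide (pvLv P j < pvLv P k)) (List.range n) : Nat) : Int)

-- canonical form of B's correction step
def pvCStep (P : List (Nat × Nat)) (w : List Int) (q : Nat × Nat) : List Int :=
  if pvC P q.1 q.2 - pvC P q.2 q.1 ≠ 0 then
    let w1 := w.set (if pvC P q.1 q.2 - pvC P q.2 q.1 > 0 then q.1 else q.2)
      (w.getD (if pvC P q.1 q.2 - pvC P q.2 q.1 > 0 then q.1 else q.2) 0 + 1)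
    if pvLv P q.1 ≠ pvLv P q.2 then
      w1.set (if pvLv P q.1 > pvLv P q.2 then q.1 else q.2)
             (w1.getD (if pvLv P q.1 > pvLv P q.2 then q.1 else q.2) 0 - 1)
    else w1
  else w

lemma pv_corr_fold (P : List (Nat × Nat)) (n : Nat) (L : List (Nat × Nat))
    (hL : ∀ q ∈ L, q.1 < n ∧ q.2 < n) (w : List Int) (hw : w.length = n) :
    (L.foldl (pvCStep P) w).length = n ∧
    ∀ k, (L.foldl (pvCStep P) w).getD k 0 = w.getD k 0 + ((L.map (pvContrib P k)).sum) := by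
  induction L generalizing w with
  | nil => simp [hw]
  | cons q t ih =>
    have hq := hL q (by simp)
    have hstepl : (pvCStep P w q).length = n := by
      unfold pvCStep
      split_ifs <;> simp [hw]
    have hstepe : ∀ k, (pvCStep P w q).getD k 0 = w.getD k 0 + pvContrib P k q := by
      intro k
      unfold pvCStep pvContrib
      by_cases hΔ : pvC P q.1 q.2 - pvC P q.2 q.1 ≠ 0
      · rw [if_pos hΔ, if_pos hΔ]
        simp only
        set a := (if pvC P q.1 q.2 - pvC P q.2 q.1 > 0 then q.1 else q.2) with ha
        set b := (if pvLv P q.1 > pvLv P q.2 then q.1 else q.2) with hb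
        have haN : a < n := by rw [ha]; split_ifs <;> omega
        have hbN : b < n := by rw [hb]; split_ifs <;> omega
        by_cases hlv : pvLv P q.1 ≠ pvLv P q.2
        · rw [if_pos hlv, if_pos hlv,
              pv_getD_set _ _ _ _ _ (by simp; omega),
              pv_getD_set _ _ _ _ _ (by omega),
              pv_getD_set _ _ _ _ _ (by omega)]
          by_cases hbk : b = k <;> by_cases hak : a = k <;>
            simp [hbk, hak] <;> omega
        · rw [if_neg hlv, if_neg hlv, pv_getD_set _ _ _ _ _ (by omega)]
          by_cases hak : a = k <;> simp [hak]
      · rw [if_neg hΔ, if_neg hΔ]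
        ring
    obtain ⟨ihl, ihe⟩ := ih (fun p hp => hL p (by simp [hp])) (pvCStep P w q) hstepl
    refine ⟨by rw [List.foldl_cons]; exact ihl, ?_⟩
    intro k
    rw [List.foldl_cons, ihe k, hstepe k, List.map_cons, List.sum_cons]
    ring

-- per-opponent identity: level rank plus correction = A's comparison
lemma pv_point (P : List (Nat × Nat)) (k j : Nat) :
    (if pvLv P j < pvLv P k then (1 : Int) else 0) + pvG P k j
      = if (decide (k ≠ j) && pvWinb P k j) then 1 else 0 := by
  unfold pvG pvWinb
  by_cases hkj : k = j
  · subst hkj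
    simp only [ne_eq, not_true_eq_false, decide_false, Bool.false_and, Bool.false_eq_true,
      if_false]
    rw [if_neg (by omega), if_neg (by omega), if_neg (by rintro ⟨h, _⟩; omega)]
    ring
  · simp only [Bool.and_eq_true, decide_eq_true_eq]
    split_ifs <;> omega

lemma pv_S_add_G (P : List (Nat × Nat)) (n k : Nat) :
    pvS P n k + ((List.range n).map (fun j => pvG P k j)).sum = pvA P n k := by
  unfold pvS pvA
  rw [← PySem.List.sum_map_ite_one_zero (fun j => decide (pvLv P j < pvLv P k)) (List.range n),
      ← PySem.List.sum_map_ite_one_zero (fun t => decide (k ≠ t) && pvWinb P k t) (List.range n),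
      ← PySem.List.sum_map_add_int]
  apply congrArg
  apply List.map_congr_left
  intro j _
  rw [show (if decide (pvLv P j < pvLv P k) = true then (1:Int) else 0)
        = (if pvLv P j < pvLv P k then (1:Int) else 0) from by simp]
  exact pv_point P k j

-- ---- the final maxima agree ----
lemma pv_le_maxD (l : List Int) (b : Int) (h : b ∈ l) :
    b ≤ PySem.List.maxD l (fun x => x) 0 := by
  unfold PySem.List.maxD
  cases hm : PySem.List.max? l (fun x => x) with
  | none => rw [PySem.List.max?_eq_none_iff] at hm; simp [hm] at h
  | some m => simpa using PySem.List.max?_isMax hm b h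

lemma pv_maxD_cases (l : List Int) :
    PySem.List.maxD l (fun x => x) 0 = 0 ∨ PySem.List.maxD l (fun x => x) 0 ∈ l := by
  by_cases h : l = []
  · subst h; left; rfl
  · right; exact PySem.List.maxD_mem l _ 0 h

lemma pv_maxD_eq_foldl (l : List Int) (hpos : ∀ x ∈ l, 0 ≤ x) :
    PySem.List.maxD l (fun x => x) 0 = l.foldl max 0 := by
  have h1 : l.foldl max 0 = l.foldl (fun acc y => max acc ((fun x => x) y)) 0 := rfl
  apply le_antisymm
  · rcases pv_maxD_cases l with h0 | hmem
    · rw [h0, h1]; exact (PySem.List.le_foldl_max_int l (fun x => x) 0).1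
    · rw [h1]; exact (PySem.List.le_foldl_max_int l (fun x => x) 0).2 _ hmem
  · rcases PySem.List.foldl_max_mem l 0 with h0 | hmem
    · rw [h0]
      rcases pv_maxD_cases l with h0' | hmem'
      · rw [h0']
      · exact hpos _ hmem'
    · exact pv_le_maxD l _ hmem

-- ---- B normalised ----
lemma pv_getD_replicate (n k : Nat) : (List.replicate n (0 : Int)).getD k 0 = 0 := by
  rcases Nat.lt_or_ge k n with h | h
  · rw [pv_getD_eq_getElem _ _ _ (by simpa using h)]
    simp
  · rw [List.getD_eq_getElem?_getD, List.getElem?_eq_none (by simpa using h)]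
    rfl

lemma pv_B_norm (friends gifts : List String)
    (hP : ∀ p ∈ pvP friends gifts, p.1 < friends.length ∧ p.2 < friends.length) :
    solution_alt friends gifts
      = PySem.List.maxD ((List.range friends.length).map (pvA (pvP friends gifts) friends.length))
          (fun x => x) 0 := by
  simp only [solution_alt]
  rw [← pv_dict_build_eq friends,
      show (List.range friends.length).foldl (fun d i => d.insert (friends.getD i "") i)
        PySem.Dict.empty = pvD friends from rfl]
  rw [pv_split2 gifts
      (fun g => ((pvD friends).getD ((PySem.Str.split₀ g).getD 0 "") 0,
                 (pvD friends).getD ((PySem.Str.split₀ g).getD 1 "") 0))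
      (fun l g =>
        (l.set ((pvD friends).getD ((PySem.Str.split₀ g).getD 0 "") 0)
            (l.getD ((pvD friends).getD ((PySem.Str.split₀ g).getD 0 "") 0) 0 + 1)).set
          ((pvD friends).getD ((PySem.Str.split₀ g).getD 1 "") 0)
          (((l.set ((pvD friends).getD ((PySem.Str.split₀ g).getD 0 "") 0)
              (l.getD ((pvD friends).getD ((PySem.Str.split₀ g).getD 0 "") 0) 0 + 1)).getD
              ((pvD friends).getD ((PySem.Str.split₀ g).getD 1 "") 0) 0) - 1))]
  set P := pvP friends gifts with hPdef
  set n := friends.length with hn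
  -- the pair-count dict is Counter(P)
  have hdfold : gifts.foldl (fun d g => d.insert
        ((pvD friends).getD ((PySem.Str.split₀ g).getD 0 "") 0,
         (pvD friends).getD ((PySem.Str.split₀ g).getD 1 "") 0)
        (d.getD ((pvD friends).getD ((PySem.Str.split₀ g).getD 0 "") 0,
                 (pvD friends).getD ((PySem.Str.split₀ g).getD 1 "") 0) 0 + 1))
      (PySem.Dict.empty : PySem.Dict (Nat × Nat) Int)
      = PySem.Dict.counter P := by
    rw [hPdef, pvP, ← PySem.Dict.foldl_insert_getD_add_one_eq_counter, List.foldl_map]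
    rfl
  rw [hdfold]
  -- the level list is the list of gift indices
  have hlf := pv_level_fold P (List.replicate n (0 : Int))
      (fun p hp => by simpa using hP p hp)
  have hlfold : gifts.foldl (fun l g =>
        (l.set ((pvD friends).getD ((PySem.Str.split₀ g).getD 0 "") 0)
            (l.getD ((pvD friends).getD ((PySem.Str.split₀ g).getD 0 "") 0) 0 + 1)).set
          ((pvD friends).getD ((PySem.Str.split₀ g).getD 1 "") 0)
          (((l.set ((pvD friends).getD ((PySem.Str.split₀ g).getD 0 "") 0)
              (l.getD ((pvD friends).getD ((PySem.Str.split₀ g).getD 0 "") 0) 0 + 1)).getD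
              ((pvD friends).getD ((PySem.Str.split₀ g).getD 1 "") 0) 0) - 1))
        (List.replicate n (0 : Int))
      = List.map (fun i => pvLv P i) (List.range n) := by
    have heq : gifts.foldl (fun l g =>
        (l.set ((pvD friends).getD ((PySem.Str.split₀ g).getD 0 "") 0)
            (l.getD ((pvD friends).getD ((PySem.Str.split₀ g).getD 0 "") 0) 0 + 1)).set
          ((pvD friends).getD ((PySem.Str.split₀ g).getD 1 "") 0)
          (((l.set ((pvD friends).getD ((PySem.Str.split₀ g).getD 0 "") 0)
              (l.getD ((pvD friends).getD ((PySem.Str.split₀ g).getD 0 "") 0) 0 + 1)).getD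
              ((pvD friends).getD ((PySem.Str.split₀ g).getD 1 "") 0) 0) - 1))
        (List.replicate n (0 : Int))
        = P.foldl (fun l p =>
            (l.set p.1 (l.getD p.1 0 + 1)).set p.2 ((l.set p.1 (l.getD p.1 0 + 1)).getD p.2 0 - 1))
          (List.replicate n (0 : Int)) := by
      rw [hPdef, pvP, List.foldl_map]
      rfl
    rw [heq]
    apply List.ext_getElem
    · rw [hlf.1]
      simp
    · intro i h1 h2
      rw [← pv_getD_eq_getElem 0 _ _ h1, ← pv_getD_eq_getElem 0 _ _ h2,
          hlf.2 i, pv_getD_replicate, PySem.List.getD_map_range _ _ _ _ (by simpa using h2),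
          pvLv]
      ring
  rw [hlfold]
  -- the rank list counts strictly smaller levels
  have hwins0 : (List.range n).map (fun i =>
        ((((PySem.List.sorted (List.map (fun i => pvLv P i) (List.range n)) (fun x => x) false).zipIdx.foldl
            (fun f p => if f.contains p.1 then f else f.insert p.1 p.2)
            (PySem.Dict.empty : PySem.Dict Int Nat)).getD
          ((List.map (fun i => pvLv P i) (List.range n)).getD i 0) 0 : Nat) : Int))
      = (List.range n).map (fun k => pvS P n k) := by
    apply List.map_congr_left
    intro i hi
    have hin : i < n := List.mem_range.mp hi
    set srt := PySem.List.sorted (List.map (fun i => pvLv P i) (List.range n)) (fun x => x) false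
      with hsrt
    rw [PySem.List.getD_map_range _ _ _ _ hin]
    have hmem : pvLv P i ∈ srt := by
      rw [hsrt, PySem.List.mem_sorted]
      exact List.mem_map.mpr ⟨i, hi, rfl⟩
    have hempty : (PySem.Dict.empty : PySem.Dict Int Nat).contains (pvLv P i) = false := by
      rw [PySem.Dict.contains_eq_isSome_get?, PySem.Dict.get?_empty]
      rfl
    rw [PySem.Dict.getD_eq_get?_getD, pv_first_build srt 0 _ _ hmem hempty]
    have hpair : srt.Pairwise (· ≤ ·) := by
      have h := PySem.List.sorted_pairwise (List.map (fun i => pvLv P i) (List.range n))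
        (fun x => x)
      exact h
    rw [Option.getD_some, Nat.zero_add, pv_idxOf_sorted srt _ hpair hmem,
        (PySem.List.sorted_perm (List.map (fun i => pvLv P i) (List.range n)) (fun x => x) false).countP_eq,
        List.countP_map]
    rfl
  rw [hwins0]
  -- the touched-pair set
  have hpairs : (PySem.Dict.counter P).keys.foldl (fun s p => PySem.Set.add s (pvNorm p))
        (PySem.Set.empty : PySem.Set (Nat × Nat))
      = PySem.Set.ofList ((PySem.Set.ofList P).map pvNorm) := by
    rw [PySem.Dict.keys_counter,
        PySem.Set.ofList_eq_foldl ((PySem.Set.ofList P).map pvNorm), List.foldl_map]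
    rfl
  rw [hpairs]
  set pairs := PySem.Set.ofList ((PySem.Set.ofList P).map pvNorm) with hpairsdef
  have hmem_pairs : ∀ q ∈ pairs, ∃ p, p ∈ P ∧ pvNorm p = q := by
    intro q hq
    rw [hpairsdef, PySem.Set.mem_ofList] at hq
    obtain ⟨p, hp, rfl⟩ := List.mem_map.mp hq
    exact ⟨p, (PySem.Set.mem_ofList P p).mp hp, rfl⟩
  have hbounds : ∀ q ∈ pairs, q.1 < n ∧ q.2 < n := by
    intro q hq
    obtain ⟨p, hp, rfl⟩ := hmem_pairs q hq
    obtain ⟨h1, h2⟩ := hP p hp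
    unfold pvNorm
    split_ifs
    · exact ⟨h1, h2⟩
    · exact ⟨h2, h1⟩
  have hnorm_le : ∀ q ∈ pairs, q.1 ≤ q.2 := by
    intro q hq
    obtain ⟨p, hp, rfl⟩ := hmem_pairs q hq
    unfold pvNorm
    split_ifs with h
    · exact Nat.le_of_lt h
    · exact Nat.le_of_not_lt h
  -- switch the correction fold to its canonical form
  have hcongr : pairs.foldl (fun w q =>
        if (PySem.Dict.counter P).getD (q.1, q.2) 0 - (PySem.Dict.counter P).getD (q.2, q.1) 0 ≠ 0 then
          if (List.map (fun i => pvLv P i) (List.range n)).getD q.1 0 ≠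
              (List.map (fun i => pvLv P i) (List.range n)).getD q.2 0 then
            (w.set (if (PySem.Dict.counter P).getD (q.1, q.2) 0 - (PySem.Dict.counter P).getD (q.2, q.1) 0 > 0 then q.1 else q.2)
                (w.getD (if (PySem.Dict.counter P).getD (q.1, q.2) 0 - (PySem.Dict.counter P).getD (q.2, q.1) 0 > 0 then q.1 else q.2) 0 + 1)).set
              (if (List.map (fun i => pvLv P i) (List.range n)).getD q.1 0 >
                  (List.map (fun i => pvLv P i) (List.range n)).getD q.2 0 then q.1 else q.2)
              ((w.set (if (PySem.Dict.counter P).getD (q.1, q.2) 0 - (PySem.Dict.counter P).getD (q.2, q.1) 0 > 0 then q.1 else q.2)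
                (w.getD (if (PySem.Dict.counter P).getD (q.1, q.2) 0 - (PySem.Dict.counter P).getD (q.2, q.1) 0 > 0 then q.1 else q.2) 0 + 1)).getD
                (if (List.map (fun i => pvLv P i) (List.range n)).getD q.1 0 >
                    (List.map (fun i => pvLv P i) (List.range n)).getD q.2 0 then q.1 else q.2) 0 - 1)
          else
            w.set (if (PySem.Dict.counter P).getD (q.1, q.2) 0 - (PySem.Dict.counter P).getD (q.2, q.1) 0 > 0 then q.1 else q.2)
                (w.getD (if (PySem.Dict.counter P).getD (q.1, q.2) 0 - (PySem.Dict.counter P).getD (q.2, q.1) 0 > 0 then q.1 else q.2) 0 + 1)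
        else w) ((List.range n).map (fun k => pvS P n k))
      = pairs.foldl (pvCStep P) ((List.range n).map (fun k => pvS P n k)) := by
    refine PySem.List.foldl_congr_mem _ _ _ _ ?_
    intro w q hq
    obtain ⟨hq1, hq2⟩ := hbounds q hq
    rw [PySem.Dict.getD_counter, PySem.Dict.getD_counter,
        PySem.List.getD_map_range _ _ _ _ hq1, PySem.List.getD_map_range _ _ _ _ hq2]
    unfold pvCStep
    rw [show ((P.count (q.1, q.2) : Int)) = pvC P q.1 q.2 from rfl,
        show ((P.count (q.2, q.1) : Int)) = pvC P q.2 q.1 from rfl]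
  rw [hcongr]
  obtain ⟨hwl, hwe⟩ := pv_corr_fold P n pairs hbounds ((List.range n).map (fun k => pvS P n k)) (by simp)
  have hfinal : pairs.foldl (pvCStep P) ((List.range n).map (fun k => pvS P n k))
      = (List.range n).map (pvA P n) := by
    apply List.ext_getElem
    · rw [hwl]; simp
    · intro k h1 h2
      have hkn : k < n := by simpa using h2
      rw [← pv_getD_eq_getElem 0 _ _ h1, ← pv_getD_eq_getElem 0 _ _ h2, hwe k,
          PySem.List.getD_map_range _ _ _ _ hkn, PySem.List.getD_map_range _ _ _ _ hkn]
      have hsum : ((pairs.map (pvContrib P k)).sum) = (((pvPairs n).map (pvContrib P k)).sum) := by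
        apply pv_sum_nodup_ext _ _ _ ?nodup1 (pv_nodup_pvPairs n) ?v1 ?v2
        case nodup1 => rw [hpairsdef]; exact PySem.Set.nodup_ofList _
        case v1 =>
          intro q hq hnq
          have hle := hnorm_le _ hq
          have hb := hbounds _ hq
          have heq : q.1 = q.2 := by
            by_contra hne
            exact hnq ((pv_mem_pairs n _).mpr ⟨by omega, hb.2⟩)
          unfold pvContrib
          rw [if_neg (by rw [heq]; simp)]
        case v2 =>
          intro q hq hnq
          have hqp := (pv_mem_pairs n q).mp hq
          have hc1 : pvC P q.1 q.2 = 0 := by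
            unfold pvC
            norm_cast
            rw [List.count_eq_zero]
            intro hmem
            apply hnq
            rw [hpairsdef, PySem.Set.mem_ofList]
            refine List.mem_map.mpr ⟨(q.1, q.2), (PySem.Set.mem_ofList P _).mpr hmem, ?_⟩
            unfold pvNorm
            rw [if_pos hqp.1]
          have hc2 : pvC P q.2 q.1 = 0 := by
            unfold pvC
            norm_cast
            rw [List.count_eq_zero]
            intro hmem
            apply hnq
            rw [hpairsdef, PySem.Set.mem_ofList]
            refine List.mem_map.mpr ⟨(q.2, q.1), (PySem.Set.mem_ofList P _).mpr hmem, ?_⟩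
            unfold pvNorm
            rw [if_neg (by have := hqp.1; omega)]
          unfold pvContrib
          rw [if_neg (by rw [hc1, hc2]; simp)]
      rw [hsum, pv_sum_pvPairs_contrib P n k hkn, pv_S_add_G]
  rw [hfinal]

-- ===== VERDICT =====
theorem solution_spec : Claim_equal_solution := by
  intro friends gifts hdom hpre
  unfold Spec_solution
  have hP : ∀ p ∈ pvP friends gifts, p.1 < friends.length ∧ p.2 < friends.length := by
    intro p hp
    obtain ⟨g, hg, rfl⟩ := List.mem_map.mp hp
    obtain ⟨hlen2, hm0, hm1⟩ := hpre g hg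
    exact ⟨pv_idx_lt friends _ hm0, pv_idx_lt friends _ hm1⟩
  rw [pv_A_norm friends gifts hP, pv_B_norm friends gifts hP]
  rw [pv_maxD_eq_foldl _ (by
    intro x hx
    obtain ⟨k, _, rfl⟩ := List.mem_map.mp hx
    exact Int.natCast_nonneg _), List.foldl_map]
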